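-- pv_equiv track=rewrite | github.com/Nghia03092004/nghia03092004.github.io | project_euler_unified/problem_868/solution.py | is_quad_free
-- ===== SOURCE A (Python) =====
-- def is_quad_free(w):
--     """Check if word w (list of ints) is quad-free."""
--     n = len(w)
--     for p in range(1, n // 4 + 1):
--         # Check if last 4p chars form xxxx
--         for start in range(n - 4 * p + 1):
--             chunk = w[start:start + 4*p]
--             x = chunk[:p]
--             if chunk == x * 4:
--                 return False
--     return True
-- ===== SOURCE B (Python) =====
-- def is_quad_free(w):
--     """Check if word w (list of ints) is quad-free."""
--     n = len(w)
--     for p in range(1, n // 4 + 1):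
--         # A length-4p quad with period p starting at s exists iff
--         # w[i] == w[i + p] for 3p consecutive indices i = s .. s + 3p - 1.
--         run = 0
--         for i in range(n - p):
--             if w[i] == w[i + p]:
--                 run += 1
--                 if run >= 3 * p:
--                     return False
--             else:
--                 run = 0
--     return True
-- ===== Notes on version B (the rewrite author's own statement) =====
-- stated objective: faster
-- what changed: Instead of materialising each candidate chunk and comparing it with x*4 for every (period, start) pair, B scans once per period p keeping a run length of consecutive positions i with w[i]==w[i+p]; a run of 3p proves a fourth power.
import Mathlib
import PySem

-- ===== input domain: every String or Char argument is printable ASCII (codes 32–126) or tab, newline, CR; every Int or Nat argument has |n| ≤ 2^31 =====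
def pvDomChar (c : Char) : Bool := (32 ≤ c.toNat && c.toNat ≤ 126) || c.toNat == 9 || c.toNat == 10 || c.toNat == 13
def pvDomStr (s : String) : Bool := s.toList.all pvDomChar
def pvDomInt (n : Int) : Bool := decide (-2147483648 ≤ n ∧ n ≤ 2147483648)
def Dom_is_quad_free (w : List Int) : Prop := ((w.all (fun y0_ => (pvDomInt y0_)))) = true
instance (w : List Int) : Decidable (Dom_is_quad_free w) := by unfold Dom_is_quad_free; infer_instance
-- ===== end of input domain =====

-- B replaces A's per-(period, start) slice-and-compare with one run scan per period p that
-- counts consecutive positions i with w[i] == w[i + p] (a run of 3p proves a fourth power).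

-- ===== PORT A =====
def is_quad_free (w : List Int) : Bool :=
  let n : Int := w.length
  !((PySem.List.pyRange 1 (PySem.Int.floordiv n 4 + 1) 1).any (fun p =>
      (PySem.List.pyRange 0 (n - 4*p + 1) 1).any (fun start =>
        let chunk := PySem.List.slice w (some start) (some (start + 4*p))
        let x := PySem.List.slice chunk (some 0) (some p)
        chunk == x ++ x ++ x ++ x)))

-- ===== PORT B =====
-- the inner 'for i in range(n - p)' loop of Source B, with its early return, as structural recursion
def pvRunScan (w : List Int) (p : Int) : List Int → Int → Bool
  | [], _ => false
  | i :: rest, run =>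
    if PySem.List.pyGetD w i 0 = PySem.List.pyGetD w (i + p) 0 then
      (if run + 1 ≥ 3 * p then true else pvRunScan w p rest (run + 1))
    else pvRunScan w p rest 0

def is_quad_free_alt (w : List Int) : Bool :=
  let n : Int := w.length
  !((PySem.List.pyRange 1 (PySem.Int.floordiv n 4 + 1) 1).any (fun p =>
      pvRunScan w p (PySem.List.pyRange 0 (n - p) 1) 0))

-- ===== PRECONDITION & SPEC =====
def Spec_is_quad_free (w : List Int) (out : Bool) : Prop := out = is_quad_free_alt w
instance (w : List Int) (out : Bool) : Decidable (Spec_is_quad_free w out) := by unfold Spec_is_quad_free; infer_instance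

-- ===== CLAIM (what is proved, stated in full; the proofs are below) =====
def Claim_equal_is_quad_free : Prop := ∀ (w : List Int), Dom_is_quad_free w → Spec_is_quad_free w (is_quad_free w)

-- ===== LEMMAS AND PROOFS =====

lemma pvRunScan_iff (w : List Int) (p e : Int) (hp : 1 ≤ p) :
    ∀ (m : Nat) (j run : Int), (e - j).toNat = m →
      0 ≤ run → run ≤ j → run + 1 ≤ 3 * p →
      (∀ t, j - run ≤ t → t < j → PySem.List.pyGetD w t 0 = PySem.List.pyGetD w (t + p) 0) →
      (pvRunScan w p (PySem.List.pyRange j e 1) run = true ↔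
        ∃ s, j - run ≤ s ∧ s + 3 * p ≤ e ∧ ∀ t, 0 ≤ t → t < 3 * p →
          PySem.List.pyGetD w (s + t) 0 = PySem.List.pyGetD w (s + t + p) 0) := by
  intro m
  induction m with
  | zero =>
    intro j run hm h0 hrj hr3 _
    have hej : e ≤ j := by omega
    rw [PySem.List.pyRange_one_eq_nil hej]
    simp only [pvRunScan]
    constructor
    · intro h; exact absurd h (by simp)
    · rintro ⟨s, h1, h2, _⟩; omega
  | succ m ih =>
    intro j run hm h0 hrj hr3 hinv
    have hje : j < e := by omega
    rw [PySem.List.pyRange_one_cons hje]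
    simp only [pvRunScan]
    by_cases hmj : PySem.List.pyGetD w j 0 = PySem.List.pyGetD w (j + p) 0
    · rw [if_pos hmj]
      by_cases htrig : run + 1 ≥ 3 * p
      · rw [if_pos htrig]
        simp only [true_iff]
        refine ⟨j - run, le_refl _, by omega, ?_⟩
        intro t ht0 ht3
        rcases lt_or_eq_of_le (show j - run + t ≤ j by omega) with hlt | heq
        · exact hinv _ (by omega) hlt
        · rw [heq]; exact hmj
      · rw [if_neg htrig]
        rw [ih (j + 1) (run + 1) (by omega) (by omega) (by omega) (by omega)
            (by
              intro t ht1 ht2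
              rcases lt_or_eq_of_le (show t ≤ j by omega) with hlt | heq
              · exact hinv _ (by omega) hlt
              · rw [heq]; exact hmj)]
        apply exists_congr; intro s
        constructor
        · rintro ⟨h1, h2, h3⟩; exact ⟨by omega, h2, h3⟩
        · rintro ⟨h1, h2, h3⟩; exact ⟨by omega, h2, h3⟩
    · rw [if_neg hmj]
      rw [ih (j + 1) 0 (by omega) (by omega) (by omega) (by omega) (by omega)]
      apply exists_congr; intro s
      constructor
      · rintro ⟨h1, h2, h3⟩; exact ⟨by omega, h2, h3⟩
      · rintro ⟨h1, h2, h3⟩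
        refine ⟨?_, h2, h3⟩
        by_contra hs
        have hsj : s ≤ j := by omega
        by_cases hwin : s + 3 * p ≤ j
        · omega
        · have := h3 (j - s) (by omega) (by omega)
          rw [show s + (j - s) = j by ring] at this
          exact hmj this


-- Step 1: fourth power iff shifted-slice equality
lemma quad_take_drop (c : List Int) (P : Nat) (hc : c.length = 4 * P) :
    (c = c.take P ++ c.take P ++ c.take P ++ c.take P) ↔ c.take (3 * P) = c.drop P := by
  set x := c.take P with hxdef
  have hx : x.length = P := by
    rw [hxdef, List.length_take]; omega
  constructor
  · intro h
    conv_lhs => rw [h]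
    conv_rhs => rw [h]
    have hassoc : x ++ x ++ x ++ x = (x ++ x ++ x) ++ x := by simp [List.append_assoc]
    rw [hassoc, List.take_left' (by simp [hx]; ring)]
    have hassoc2 : (x ++ x ++ x) ++ x = x ++ (x ++ x ++ x) := by simp [List.append_assoc]
    rw [hassoc2, List.drop_left' hx]
  · intro h
    have hsplit : c = x ++ c.take (3 * P) := by
      conv_lhs => rw [(List.take_append_drop P c).symm, ← h]
    have h3 : c.take (3 * P) = x ++ c.take (2 * P) := by
      conv_lhs => rw [hsplit]
      rw [List.take_append, List.take_of_length_le (by omega), hx,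
        show 3 * P - P = 2 * P by omega, List.take_take,
        show min (2 * P) (3 * P) = 2 * P by omega]
    have h2 : c.take (2 * P) = x ++ c.take P := by
      conv_lhs => rw [hsplit]
      rw [List.take_append, List.take_of_length_le (by omega), hx,
        show 2 * P - P = P by omega, List.take_take,
        show min P (3 * P) = P by omega]
    conv_lhs => rw [hsplit, h3, h2]
    simp [List.append_assoc, hxdef]

-- Step 2: shifted-slice equality iff pointwise window of matches
lemma take_drop_window (w : List Int) (S P : Nat) :
    (((w.drop S).take (4 * P)).take (3 * P) = ((w.drop S).take (4 * P)).drop P) ↔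
    ∀ T, T < 3 * P → w[S + T]? = w[S + P + T]? := by
  have e1 : ((w.drop S).take (4 * P)).take (3 * P) = (w.drop S).take (3 * P) := by
    rw [List.take_take]; congr 1; omega
  have e2 : ((w.drop S).take (4 * P)).drop P = (w.drop (S + P)).take (3 * P) := by
    rw [List.drop_take, List.drop_drop]
    congr 1
    omega
  rw [e1, e2]
  constructor
  · intro h T hT
    have := congrArg (fun l => l[T]?) h
    simpa [List.getElem?_take, hT, List.getElem?_drop] using this
  · intro h
    apply List.ext_getElem?
    intro i
    by_cases hi : i < 3 * P
    · simp [hi, List.getElem?_drop, h i hi]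
    · simp [hi]

lemma chunk_iff (w : List Int) (p s : Int) (hp : 1 ≤ p) (h0 : 0 ≤ s)
    (h4 : s + 4 * p ≤ (w.length : Int)) :
    (PySem.List.slice w (some s) (some (s + 4 * p)) =
      (PySem.List.slice (PySem.List.slice w (some s) (some (s + 4 * p))) (some 0) (some p)) ++
      (PySem.List.slice (PySem.List.slice w (some s) (some (s + 4 * p))) (some 0) (some p)) ++
      (PySem.List.slice (PySem.List.slice w (some s) (some (s + 4 * p))) (some 0) (some p)) ++
      (PySem.List.slice (PySem.List.slice w (some s) (some (s + 4 * p))) (some 0) (some p))) ↔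
    ∀ t : Int, 0 ≤ t → t < 3 * p →
      PySem.List.pyGetD w (s + t) 0 = PySem.List.pyGetD w (s + t + p) 0 := by
  set S := s.toNat with hS
  set P := p.toNat with hP
  have hsl : PySem.List.slice w (some s) (some (s + 4 * p)) = (w.drop S).take (4 * P) := by
    rw [PySem.List.slice_toNat w h0 (by omega)]
    congr 1
    omega
  have hlen : S + 4 * P ≤ w.length := by omega
  rw [hsl]
  have hxsl : PySem.List.slice ((w.drop S).take (4 * P)) (some 0) (some p) =
      ((w.drop S).take (4 * P)).take P := by
    rw [PySem.List.slice_zero_start, PySem.List.slice_to _ (by omega)]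
  rw [hxsl]
  have hclen : ((w.drop S).take (4 * P)).length = 4 * P := by
    simp [List.length_take, List.length_drop]
    omega
  rw [quad_take_drop _ P hclen, take_drop_window w S P]
  constructor
  · intro h t ht0 ht3
    have hT : t.toNat < 3 * P := by omega
    have hh := h t.toNat hT
    rw [show s + t + p = ((S + P + t.toNat : Nat) : Int) by push_cast; omega,
        show s + t = ((S + t.toNat : Nat) : Int) by push_cast; omega,
        PySem.List.pyGetD_natCast, PySem.List.pyGetD_natCast,
        List.getD_eq_getElem?_getD, List.getD_eq_getElem?_getD, hh]
  · intro h T hT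
    have hh := h (T : Int) (by omega) (by omega)
    rw [show s + (T : Int) + p = ((S + P + T : Nat) : Int) by push_cast; omega,
        show s + (T : Int) = ((S + T : Nat) : Int) by push_cast; omega,
        PySem.List.pyGetD_natCast, PySem.List.pyGetD_natCast,
        List.getD_eq_getElem (w) 0 (by omega), List.getD_eq_getElem (w) 0 (by omega)] at hh
    rw [List.getElem?_eq_getElem (by omega : S + T < w.length),
        List.getElem?_eq_getElem (by omega : S + P + T < w.length), hh]


lemma pvRunScan_iff0 (w : List Int) (p e : Int) (hp : 1 ≤ p) :
    pvRunScan w p (PySem.List.pyRange 0 e 1) 0 = true ↔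
      ∃ s, 0 ≤ s ∧ s + 3 * p ≤ e ∧ ∀ t, 0 ≤ t → t < 3 * p →
        PySem.List.pyGetD w (s + t) 0 = PySem.List.pyGetD w (s + t + p) 0 := by
  have := pvRunScan_iff w p e hp (e - 0).toNat 0 0 rfl (le_refl 0) (le_refl 0) (by omega)
    (by intro t h1 h2; exact absurd h2 (by omega))
  simpa using this

theorem pv_main_eq (w : List Int) : is_quad_free w = is_quad_free_alt w := by
  simp only [is_quad_free, is_quad_free_alt]
  congr 1
  apply PySem.List.any_congr_mem
  intro p hpmem
  rw [PySem.List.mem_pyRange_one] at hpmem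
  obtain ⟨hp1, hp2⟩ := hpmem
  have hp4 : 4 * p ≤ (w.length : Int) := by
    have h := (PySem.Int.le_floordiv_iff_mul_le
      (a := (w.length : Int)) (b := 4) (q := p) (by norm_num)).mp (by omega)
    omega
  rw [Bool.eq_iff_iff, List.any_eq_true, pvRunScan_iff0 w p _ hp1]
  constructor
  · rintro ⟨start, hmem, hf⟩
    rw [PySem.List.mem_pyRange_one] at hmem
    simp only [beq_iff_eq] at hf
    rw [chunk_iff w p start hp1 hmem.1 (by omega)] at hf
    exact ⟨start, by omega, by omega, hf⟩
  · rintro ⟨s, hs1, hs2, hwin⟩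
    refine ⟨s, ?_, ?_⟩
    · rw [PySem.List.mem_pyRange_one]; omega
    · simp only [beq_iff_eq]
      rw [chunk_iff w p s hp1 (by omega) (by omega)]
      exact hwin

-- ===== VERDICT (by name: the statement is the Claim_ definition above) =====
theorem is_quad_free_spec : Claim_equal_is_quad_free := by
  intro w _
  unfold Spec_is_quad_free
  exact pv_main_eq w
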